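-- pv_equiv track=rewrite | github.com/AP-MI-2021/lab-3-zaharie-stefan-ubb | main.py | get_longest_prime_digits
-- ===== SOURCE A (Python) =====
-- from math import sqrt
-- from itertools import islice, count
--
-- def is_prime(num: int) -> bool:
--     """Determină dacă numărul dat este prim."""
--     if num < 2:
--         return False
--
--     for div in islice(count(2), int(sqrt(num) - 1)):
--         if num % div == 0:
--             return False
--
--     return True
--
-- def get_longest_prime_digits(lst: int) -> list[int]:
--     """Determina cea mai lunga subsecventa dintr-o lista cu proprietatea
--     ca toate numerele din ea sunt formate doar din cifre prime"""
--     ans = []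
--     sequence = []
--
--     for num in lst:
--         num_copy = num
--         ok = True
--         while num > 0:
--             if not is_prime(num % 10):
--                 ok = False
--                 break
--             num //= 10
--
--         if ok:
--             sequence.append(num_copy)
--         else:
--             if len(sequence) > len(ans):
--                 ans = sequence
--             sequence = []
--
--     # edge case, sequence is at the end of the list
--     if len(sequence) > len(ans):
--         ans = sequence
--
--     return ans
-- ===== SOURCE B (Python) =====
-- def _bad(num):
--     # 0 and negatives have no digits: not bad (the while loop never runs)
--     while num > 0:
--         if num % 10 not in (2, 3, 5, 7):
--             return True
--         num //= 10
--     return False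
--
--
-- def get_longest_prime_digits(lst):
--     # Staged: collect positions of bad numbers, bracket them with sentinels,
--     # pick the widest gap between consecutive bad positions (first wins ties),
--     # and return that slice of the list.
--     bounds = [-1] + [i for i, num in enumerate(lst) if _bad(num)] + [len(lst)]
--     start, length = 0, 0
--     for i, j in zip(bounds, bounds[1:]):
--         if j - i - 1 > length:
--             start, length = i + 1, j - i - 1
--     return lst[start:start + length]
-- ===== Notes on version B (the rewrite author's own statement) =====
-- stated objective: alternative
-- what changed: B works on indices instead of accumulating runs: it collects the positions of the bad (non-prime-digit) numbers in one pass, brackets them with sentinels -1 and len(lst), picks the widest gap between consecutive bad positions (first gap wins ties), and returns that slice of the list, replacing A's running ans/sequence accumulator and trial-division is_prime.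
import Mathlib
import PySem

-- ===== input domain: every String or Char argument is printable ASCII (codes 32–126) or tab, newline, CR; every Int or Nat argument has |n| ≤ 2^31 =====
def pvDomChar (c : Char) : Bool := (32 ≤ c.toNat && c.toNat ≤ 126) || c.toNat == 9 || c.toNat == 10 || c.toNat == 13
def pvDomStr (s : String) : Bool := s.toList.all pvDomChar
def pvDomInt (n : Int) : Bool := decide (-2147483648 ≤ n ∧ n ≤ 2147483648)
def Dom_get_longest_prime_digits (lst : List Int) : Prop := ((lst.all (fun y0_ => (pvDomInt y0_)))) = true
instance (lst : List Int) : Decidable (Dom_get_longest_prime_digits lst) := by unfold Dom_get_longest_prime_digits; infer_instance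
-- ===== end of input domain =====

-- B replaces A's running ans/sequence accumulator by an index-based scheme: collect the
-- positions of bad numbers, pick the widest gap between consecutive bad positions
-- (first wins ties) and return that slice (objective: alternative, same cost).


-- ===== PORT A =====
-- is_prime: 'for div in islice(count(2), int(sqrt(num) - 1))' = range(2, 2 + int(sqrt(num)-1)).
-- int(sqrt(num) - 1) is ported as Int.sqrt num - 1: exact for the small arguments (the
-- decimal digits 0..9) this helper receives from get_longest_prime_digits.
def isPrimeA (num : Int) : Bool :=
  if num < 2 then false
  else
    (PySem.List.pyRange 2 (2 + (Int.sqrt num - 1)) 1).all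
      (fun d => !(PySem.Int.mod num d == 0))

-- the 'while num > 0' digit loop of A, returning ok
def digitsOkA (num : Int) : Bool :=
  if _h : 0 < num then
    if !(isPrimeA (PySem.Int.mod num 10)) then false
    else digitsOkA (PySem.Int.floordiv num 10)
  else true
termination_by num.toNat
decreasing_by
  rw [PySem.Int.floordiv_eq_ediv_of_pos (by omega : (0:Int) < 10)]
  omega

def aLoop (l : List Int) (ans seq : List Int) : List Int :=
  match l with
  | [] => if seq.length > ans.length then seq else ans
  | num :: rest =>
    if digitsOkA num then aLoop rest ans (seq ++ [num])
    else if seq.length > ans.length then aLoop rest seq []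
    else aLoop rest ans []

def get_longest_prime_digits (lst : List Int) : List Int := aLoop lst [] []

-- ===== PORT B =====
-- _bad: 'while num > 0: if num % 10 not in (2,3,5,7): return True; num //= 10; return False'
def badB (num : Int) : Bool :=
  if _h : 0 < num then
    if !(PySem.Int.mod num 10 == 2 || PySem.Int.mod num 10 == 3 ||
         PySem.Int.mod num 10 == 5 || PySem.Int.mod num 10 == 7) then true
    else badB (PySem.Int.floordiv num 10)
  else false
termination_by num.toNat
decreasing_by
  rw [PySem.Int.floordiv_eq_ediv_of_pos (by omega : (0:Int) < 10)]
  omega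

-- body of the 'for i, j in zip(bounds, bounds[1:])' loop
def gapStep (st : Int × Int) (p : Int × Int) : Int × Int :=
  if p.2 - p.1 - 1 > st.2 then (p.1 + 1, p.2 - p.1 - 1) else st

def get_longest_prime_digits_alt (lst : List Int) : List Int :=
  -- bounds = [-1] + [i for i, num in enumerate(lst) if _bad(num)] + [len(lst)]
  let bounds : List Int :=
    [-1] ++ ((PySem.List.enumerate lst 0).filter (fun p => badB p.2)).map (fun p => p.1)
      ++ [(lst.length : Int)]
  let st := (bounds.zip bounds.tail).foldl gapStep ((0:Int), (0:Int))
  -- lst[start:start + length]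
  PySem.List.slice lst (some st.1) (some (st.1 + st.2))

-- ===== PRECONDITION & SPEC =====
def Spec_get_longest_prime_digits (lst : List Int) (out : List Int) : Prop := out = get_longest_prime_digits_alt lst
instance (lst : List Int) (out : List Int) : Decidable (Spec_get_longest_prime_digits lst out) := by unfold Spec_get_longest_prime_digits; infer_instance

-- ===== CLAIM (what is proved, stated in full; the proofs are below) =====
def Claim_equal_get_longest_prime_digits : Prop := ∀ (lst : List Int), Dom_get_longest_prime_digits lst → Spec_get_longest_prime_digits lst (get_longest_prime_digits lst)

-- ===== LEMMAS AND PROOFS =====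

-- the good predicate: A's digit loop succeeds / B's _bad is false
def gd (num : Int) : Bool := !badB num

-- A's is_prime agrees with the membership test on every decimal digit
theorem isPrimeA_digit (d : Int) (h0 : 0 ≤ d) (h9 : d < 10) :
    isPrimeA d = (d == 2 || d == 3 || d == 5 || d == 7) := by
  have h2 : Int.sqrt 2 = 1 := by rw [Int.sqrt, show Int.toNat 2 = 2 from rfl]; norm_num
  have h3 : Int.sqrt 3 = 1 := by rw [Int.sqrt, show Int.toNat 3 = 3 from rfl]; norm_num
  have h4 : Int.sqrt 4 = 2 := by rw [Int.sqrt, show Int.toNat 4 = 4 from rfl]; norm_num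
  have h5 : Int.sqrt 5 = 2 := by rw [Int.sqrt, show Int.toNat 5 = 5 from rfl]; norm_num
  have h6 : Int.sqrt 6 = 2 := by rw [Int.sqrt, show Int.toNat 6 = 6 from rfl]; norm_num
  have h7 : Int.sqrt 7 = 2 := by rw [Int.sqrt, show Int.toNat 7 = 7 from rfl]; norm_num
  have h8 : Int.sqrt 8 = 2 := by rw [Int.sqrt, show Int.toNat 8 = 8 from rfl]; norm_num
  have s9 : Int.sqrt 9 = 3 := by rw [Int.sqrt, show Int.toNat 9 = 9 from rfl]; norm_num
  interval_cases d <;> simp only [isPrimeA, h2, h3, h4, h5, h6, h7, h8, s9] <;> decide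

-- the two digit loops agree on every integer
theorem okA_eq_gd (num : Int) : digitsOkA num = gd num := by
  rw [digitsOkA, gd, badB]
  by_cases h : 0 < num
  · have hm := isPrimeA_digit (PySem.Int.mod num 10)
      (PySem.Int.mod_nonneg num (by omega : (0:Int) < 10))
      (PySem.Int.mod_lt num (by omega : (0:Int) < 10))
    have ih := okA_eq_gd (PySem.Int.floordiv num 10)
    rw [gd] at ih
    simp only [h, dite_true, hm, ih]
    cases badB (PySem.Int.floordiv num 10) <;>
      cases hb : (PySem.Int.mod num 10 == 2 || PySem.Int.mod num 10 == 3 ||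
        PySem.Int.mod num 10 == 5 || PySem.Int.mod num 10 == 7) <;> simp
  · simp [h]
termination_by num.toNat
decreasing_by
  rw [PySem.Int.floordiv_eq_ediv_of_pos (by omega : (0:Int) < 10)]
  omega

-- groupby-style maximal runs keyed by gd (proof-side reference for A's loop)
def runsB (l : List Int) : List (Bool × List Int) :=
  match l with
  | [] => []
  | x :: xs =>
    (gd x, x :: xs.takeWhile (fun y => gd y == gd x)) ::
      runsB (xs.dropWhile (fun y => gd y == gd x))
termination_by l.length
decreasing_by
  exact Nat.lt_succ_of_le (List.length_dropWhile_le _ _)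

def bestStep (best : List Int) (kg : Bool × List Int) : List Int :=
  if kg.1 then (if kg.2.length > best.length then kg.2 else best) else best

-- consuming a run of good numbers just appends them to sequence
theorem aLoop_goodRun (r : List Int) (rest ans seq : List Int)
    (hr : ∀ y ∈ r, gd y = true) :
    aLoop (r ++ rest) ans seq = aLoop rest ans (seq ++ r) := by
  induction r generalizing seq with
  | nil => simp
  | cons y ys ih =>
    have hy : digitsOkA y = true := (okA_eq_gd y).trans (hr y (by simp))
    simp only [List.cons_append, aLoop, hy, if_true]
    rw [ih _ (fun z hz => hr z (by simp [hz]))]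
    simp

-- consuming a run of bad numbers with empty sequence changes nothing
theorem aLoop_badRun (bs : List Int) (rest ans : List Int)
    (hb : ∀ y ∈ bs, gd y = false) :
    aLoop (bs ++ rest) ans [] = aLoop rest ans [] := by
  induction bs with
  | nil => rfl
  | cons y ys ih =>
    have hy : digitsOkA y = false := (okA_eq_gd y).trans (hb y (by simp))
    simp only [List.cons_append, aLoop, hy, List.length_nil]
    rw [if_neg (by simp), if_neg (by omega)]
    exact ih (fun z hz => hb z (by simp [hz]))

-- the fold over runs ignores a leading bad run
theorem fold_dropBad (zs : List Int) (ans : List Int) :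
    List.foldl bestStep ans (runsB (zs.dropWhile (fun y => gd y == false))) =
    List.foldl bestStep ans (runsB zs) := by
  cases zs with
  | nil => rfl
  | cons y ys =>
    by_cases hy : gd y = true
    · simp [List.dropWhile, hy]
    · have hy' : gd y = false := by simpa using hy
      rw [runsB]
      simp only [List.dropWhile, hy', List.foldl_cons]
      simp [bestStep]

-- A's loop from empty sequence equals the fold over runs
theorem aLoop_eq_fold (l : List Int) (ans : List Int) :
    aLoop l ans [] = List.foldl bestStep ans (runsB l) := by
  match l with
  | [] => simp [aLoop, runsB]
  | x :: xs =>
    by_cases hx : gd x = true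
    · have hp : (fun y => gd y == gd x) = (fun y => gd y == true) := by rw [hx]
      have hdecomp : xs = xs.takeWhile (fun y => gd y == true) ++
          xs.dropWhile (fun y => gd y == true) :=
        (List.takeWhile_append_dropWhile).symm
      have hgood : ∀ y ∈ x :: xs.takeWhile (fun y => gd y == true), gd y = true := by
        intro y hy
        rcases List.mem_cons.mp hy with rfl | hy
        · exact hx
        · simpa using List.mem_takeWhile_imp hy
      rw [runsB, hp]
      have h1 : aLoop (x :: xs) ans [] =
          aLoop (xs.dropWhile (fun y => gd y == true)) ans
            (x :: xs.takeWhile (fun y => gd y == true)) := by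
        conv_lhs => rw [show x :: xs = (x :: xs.takeWhile (fun y => gd y == true)) ++
          xs.dropWhile (fun y => gd y == true) by
            simp only [List.cons_append]; rw [← hdecomp]]
        rw [aLoop_goodRun _ _ _ _ hgood]
        simp
      rw [h1, List.foldl_cons]
      have hstep : bestStep ans (gd x, x :: xs.takeWhile (fun y => gd y == true)) =
          if (x :: xs.takeWhile (fun y => gd y == true)).length > ans.length
          then x :: xs.takeWhile (fun y => gd y == true) else ans := by
        simp [bestStep, hx]
      cases hdw : xs.dropWhile (fun y => gd y == true) with
      | nil =>
        rw [hstep]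
        simp only [aLoop, runsB, List.foldl_nil]
      | cons z zs =>
        have hz : gd z = false := by
          have := List.head?_dropWhile_not (p := fun y => gd y == true) (l := xs)
          rw [hdw] at this; simpa using this
        have hzA : digitsOkA z = false := (okA_eq_gd z).trans hz
        have hlen : zs.length < (x :: xs).length := by
          have h2 : (z :: zs).length ≤ xs.length := by
            rw [← hdw]; exact List.length_dropWhile_le _ _
          simp at h2 ⊢; omega
        have h2 : aLoop (z :: zs) ans (x :: xs.takeWhile (fun y => gd y == true)) =
            aLoop zs (if (x :: xs.takeWhile (fun y => gd y == true)).length > ans.length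
              then x :: xs.takeWhile (fun y => gd y == true) else ans) [] := by
          conv_lhs => rw [aLoop]
          rw [hzA]
          simp only [Bool.false_eq_true, if_false]
          split_ifs with hc <;> rfl
        rw [h2, hstep, aLoop_eq_fold zs]
        have h3 := fold_dropBad (z :: zs)
          (if (x :: xs.takeWhile (fun y => gd y == true)).length > ans.length
            then x :: xs.takeWhile (fun y => gd y == true) else ans)
        have h4 := fold_dropBad zs
          (if (x :: xs.takeWhile (fun y => gd y == true)).length > ans.length
            then x :: xs.takeWhile (fun y => gd y == true) else ans)
        simp only [List.dropWhile_cons, hz, beq_self_eq_true, if_true] at h3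
        rw [← h3]
        rw [← h4]
    · have hx0 : gd x = false := by simpa using hx
      have hxA : digitsOkA x = false := (okA_eq_gd x).trans hx0
      have hp : (fun y => gd y == gd x) = (fun y => gd y == false) := by rw [hx0]
      have h1 : aLoop (x :: xs) ans [] = aLoop xs ans [] := by
        simp only [aLoop, hxA]
        rw [if_neg (by simp), if_neg (by simp)]
      have hdecomp : xs = xs.takeWhile (fun y => gd y == false) ++
          xs.dropWhile (fun y => gd y == false) :=
        (List.takeWhile_append_dropWhile).symm
      have hbad : ∀ y ∈ xs.takeWhile (fun y => gd y == false), gd y = false := by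
        intro y hy; simpa using List.mem_takeWhile_imp hy
      have hlen : (xs.dropWhile (fun y => gd y == false)).length < (x :: xs).length :=
        Nat.lt_succ_of_le (List.length_dropWhile_le _ _)
      rw [h1]
      conv_lhs => rw [hdecomp]
      rw [aLoop_badRun _ _ _ hbad,
        aLoop_eq_fold (xs.dropWhile (fun y => gd y == false)) ans]
      rw [runsB, hp, List.foldl_cons]
      simp [bestStep, hx0]
termination_by l.length
decreasing_by all_goals assumption

-- ---- B side: reference recursions ----

-- positions (offset c) of the bad elements
def badPosC (l : List Int) (c : Int) : List Int :=
  match l with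
  | [] => []
  | x :: xs => if badB x then c :: badPosC xs (c + 1) else badPosC xs (c + 1)

-- the enumerate/filter/map comprehension equals badPosC
theorem enum_eq_badPosC (l : List Int) (c : Int) :
    ((PySem.List.enumerate l c).filter (fun p => badB p.2)).map (fun p => p.1) =
    badPosC l c := by
  induction l generalizing c with
  | nil => simp [PySem.List.enumerate_nil, badPosC]
  | cons x xs ih =>
    rw [PySem.List.enumerate_cons, badPosC]
    by_cases hx : badB x = true <;> simp [hx, ih]

-- indexed maximal good runs (start position, elements)
def gruns (l : List Int) (c : Int) : List (Int × List Int) :=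
  match l with
  | [] => []
  | x :: xs =>
    if badB x then gruns xs (c + 1)
    else
      (c, x :: xs.takeWhile (fun y => gd y == true)) ::
        gruns (xs.dropWhile (fun y => gd y == true))
          (c + (x :: xs.takeWhile (fun y => gd y == true)).length)
termination_by l.length
decreasing_by
  · exact Nat.lt_succ_self _
  · exact Nat.lt_succ_of_le (List.length_dropWhile_le _ _)

def pickIdx (st : Int × Int) (p : Int × List Int) : Int × Int :=
  if (p.2.length : Int) > st.2 then (p.1, (p.2.length : Int)) else st

def pickLen (best : List Int) (p : Int × List Int) : List Int :=
  if p.2.length > best.length then p.2 else best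

-- the bounds list with offset c
def boundsC (l : List Int) (c : Int) : List Int :=
  (c - 1) :: badPosC l c ++ [c + (l.length : Int)]

-- bad prefix absorbed into badPosC
theorem badPosC_goodPrefix (p : List Int) (t : List Int) (c : Int)
    (hp : ∀ y ∈ p, badB y = false) :
    badPosC (p ++ t) c = badPosC t (c + p.length) := by
  induction p generalizing c with
  | nil => simp
  | cons y ys ih =>
    have hy := hp y (by simp)
    rw [List.cons_append, badPosC, if_neg (by simp [hy])]
    rw [ih _ (fun z hz => hp z (by simp [hz]))]
    congr 1
    simp only [List.length_cons]
    push_cast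
    omega

-- zip-with-tail of a two-headed cons, one step
theorem zipTail_cons (a u : Int) (w : List Int) :
    ((a :: u :: w).zip (a :: u :: w).tail) = (a, u) :: ((u :: w).zip (u :: w).tail) := by
  simp

-- the zipped-bounds fold equals the fold over indexed runs
theorem gapFold_eq_pickFold (l : List Int) (c : Int) (st : Int × Int)
    (hL : 0 ≤ st.2) :
    ((boundsC l c).zip (boundsC l c).tail).foldl gapStep st =
    (gruns l c).foldl pickIdx st := by
  match l with
  | [] =>
    rw [show gruns ([] : List Int) c = [] from by rw [gruns],
      boundsC, show badPosC ([] : List Int) c = [] from rfl]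
    simp only [List.length_nil, Int.natCast_zero, add_zero, List.cons_append,
      List.nil_append, List.zip_cons_cons, List.tail_cons, List.zip_nil_right,
      List.foldl_cons, List.foldl_nil]
    rw [gapStep, if_neg (by omega)]
  | x :: xs =>
    by_cases hx : badB x = true
    · -- bad head: the pair (c-1, c) never beats st, offset moves to c+1
      have hbp : badPosC (x :: xs) c = c :: badPosC xs (c + 1) := by
        rw [badPosC, if_pos hx]
      have hE : c + ((x :: xs).length : Int) = (c + 1) + (xs.length : Int) := by
        simp only [List.length_cons]; push_cast; ring
      have hb3 : boundsC xs (c + 1) =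
          c :: (badPosC xs (c + 1) ++ [(c + 1) + (xs.length : Int)]) := by
        rw [boundsC, show c + 1 - 1 = c from by ring]
        simp only [List.cons_append]
      have hb2 : boundsC (x :: xs) c = (c - 1) :: boundsC xs (c + 1) := by
        rw [boundsC, hbp, hE, hb3]
        simp
      rw [hb2, hb3, zipTail_cons, ← hb3, List.foldl_cons, gruns, if_pos hx,
        show gapStep st (c - 1, c) = st from by
          rw [gapStep, if_neg (by omega)]]
      exact gapFold_eq_pickFold xs (c + 1) st hL
    · -- good head: the first run r = x :: takeWhile, pair (c-1, c+|r|)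
      have hgoodr : ∀ y ∈ x :: xs.takeWhile (fun y => gd y == true), badB y = false := by
        intro y hy
        rcases List.mem_cons.mp hy with rfl | hy
        · simpa using hx
        · have := List.mem_takeWhile_imp hy
          simp [gd] at this
          exact this
      have hdecomp : x :: xs = (x :: xs.takeWhile (fun y => gd y == true)) ++
          xs.dropWhile (fun y => gd y == true) := by
        simp only [List.cons_append]
        rw [List.takeWhile_append_dropWhile]
      have hbp : badPosC (x :: xs) c =
          badPosC (xs.dropWhile (fun y => gd y == true))
            (c + ((x :: xs.takeWhile (fun y => gd y == true)).length : Int)) := by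
        conv_lhs => rw [hdecomp]
        exact badPosC_goodPrefix _ _ c hgoodr
      have hlenl : ((x :: xs).length : Int) =
          ((x :: xs.takeWhile (fun y => gd y == true)).length : Int) +
          ((xs.dropWhile (fun y => gd y == true)).length : Int) := by
        conv_lhs => rw [hdecomp]
        push_cast [List.length_append]
        ring
      rw [gruns, if_neg hx, List.foldl_cons]
      have hstep : pickIdx st (c, x :: xs.takeWhile (fun y => gd y == true)) =
          gapStep st (c - 1, c + ((x :: xs.takeWhile (fun y => gd y == true)).length : Int)) := by
        rw [pickIdx, gapStep]
        by_cases hc : ((x :: xs.takeWhile (fun y => gd y == true)).length : Int) > st.2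
        · rw [if_pos hc, if_pos (by omega)]
          simp only [Prod.mk.injEq]
          constructor <;> omega
        · rw [if_neg hc, if_neg (by omega)]
      rw [hstep]
      cases hdw : xs.dropWhile (fun y => gd y == true) with
      | nil =>
        -- the whole list is one good run
        rw [hdw] at hbp hlenl
        rw [show badPosC ([] : List Int)
            (c + ((x :: xs.takeWhile (fun y => gd y == true)).length : Int)) = []
          from by rw [badPosC]] at hbp
        simp only [List.length_nil, Int.natCast_zero, add_zero] at hlenl
        rw [boundsC, hbp, hlenl, show gruns ([] : List Int)
            (c + ((x :: xs.takeWhile (fun y => gd y == true)).length : Int)) = []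
          from by rw [gruns]]
        simp only [List.nil_append, List.cons_append, List.zip_cons_cons, List.tail_cons,
          List.zip_nil_right, List.foldl_cons, List.foldl_nil]
      | cons b t =>
        have hbadb : badB b = true := by
          have := List.head?_dropWhile_not (p := fun y => gd y == true) (l := xs)
          rw [hdw] at this
          simp [gd] at this
          exact this
        rw [hdw] at hbp hlenl
        rw [show badPosC (b :: t)
            (c + ((x :: xs.takeWhile (fun y => gd y == true)).length : Int)) =
            (c + ((x :: xs.takeWhile (fun y => gd y == true)).length : Int)) ::
            badPosC t (c + ((x :: xs.takeWhile (fun y => gd y == true)).length : Int) + 1)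
          from by rw [badPosC, if_pos hbadb]] at hbp
        have hE : c + ((x :: xs).length : Int) =
            (c + ((x :: xs.takeWhile (fun y => gd y == true)).length : Int) + 1) +
            (t.length : Int) := by
          rw [hlenl]
          simp only [List.length_cons]
          push_cast
          ring
        have hb3 : boundsC t
            (c + ((x :: xs.takeWhile (fun y => gd y == true)).length : Int) + 1) =
            (c + ((x :: xs.takeWhile (fun y => gd y == true)).length : Int)) ::
            (badPosC t (c + ((x :: xs.takeWhile (fun y => gd y == true)).length : Int) + 1) ++
             [(c + ((x :: xs.takeWhile (fun y => gd y == true)).length : Int) + 1) +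
              (t.length : Int)]) := by
          rw [boundsC, show c + ((x :: xs.takeWhile (fun y => gd y == true)).length : Int) + 1 - 1 =
            c + ((x :: xs.takeWhile (fun y => gd y == true)).length : Int) from by ring]
          simp only [List.cons_append]
        have hb2 : boundsC (x :: xs) c = (c - 1) :: boundsC t
            (c + ((x :: xs.takeWhile (fun y => gd y == true)).length : Int) + 1) := by
          rw [boundsC, hbp, hE, hb3]
          simp
        have hlt : t.length < (x :: xs).length := by
          have h2 : (b :: t).length ≤ xs.length := by
            rw [← hdw]; exact List.length_dropWhile_le _ _
          simp at h2 ⊢; omega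
        rw [hb2, hb3, zipTail_cons, ← hb3, List.foldl_cons,
          show gruns (b :: t) (c + ((x :: xs.takeWhile (fun y => gd y == true)).length : Int)) =
            gruns t (c + ((x :: xs.takeWhile (fun y => gd y == true)).length : Int) + 1)
          from by rw [gruns, if_pos hbadb]]
        have hL' : 0 ≤ (gapStep st
            (c - 1, c + ((x :: xs.takeWhile (fun y => gd y == true)).length : Int))).2 := by
          rw [gapStep]
          split_ifs with h
          · show (0:Int) ≤ c + ((x :: xs.takeWhile (fun y => gd y == true)).length : Int) - (c - 1) - 1
            omega
          · exact hL
        exact gapFold_eq_pickFold t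
          (c + ((x :: xs.takeWhile (fun y => gd y == true)).length : Int) + 1) _ hL'
termination_by l.length
decreasing_by
  · exact Nat.lt_succ_self _
  · exact hlt

-- every indexed run is the corresponding segment of the list
theorem gruns_segment (l : List Int) (c : Int) (p : Int × List Int)
    (hp : p ∈ gruns l c) :
    ∃ j : Nat, p.1 = c + j ∧ (l.drop j).take p.2.length = p.2 := by
  match l with
  | [] =>
    rw [show gruns ([] : List Int) c = [] from by rw [gruns]] at hp
    simp at hp
  | x :: xs =>
    by_cases hx : badB x = true
    · rw [gruns, if_pos hx] at hp
      obtain ⟨j, hj1, hj2⟩ := gruns_segment xs (c + 1) p hp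
      exact ⟨j + 1, by push_cast; omega, by simpa using hj2⟩
    · rw [gruns, if_neg hx] at hp
      rcases List.mem_cons.mp hp with rfl | hp'
      · refine ⟨0, by simp, ?_⟩
        simp only [List.drop_zero, List.length_cons, List.take_succ_cons]
        congr 1
        exact (List.prefix_iff_eq_take.mp (List.takeWhile_prefix _)).symm
      · have hlt : (xs.dropWhile (fun y => gd y == true)).length < (x :: xs).length :=
          Nat.lt_succ_of_le (List.length_dropWhile_le _ _)
        obtain ⟨j, hj1, hj2⟩ := gruns_segment (xs.dropWhile (fun y => gd y == true))
          (c + ((x :: xs.takeWhile (fun y => gd y == true)).length : Int)) p hp'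
        refine ⟨(x :: xs.takeWhile (fun y => gd y == true)).length + j, ?_, ?_⟩
        · rw [hj1]; push_cast; ring
        · rw [show x :: xs = (x :: xs.takeWhile (fun y => gd y == true)) ++
              xs.dropWhile (fun y => gd y == true) from by
            simp only [List.cons_append]
            rw [List.takeWhile_append_dropWhile]]
          rw [← List.drop_drop, List.drop_left]
          exact hj2
termination_by l.length
decreasing_by
  · exact Nat.lt_succ_self _
  · exact hlt

-- coupling the index fold with the list fold
theorem pick_couple (l : List Int) (runs : List (Int × List Int)) (st : Int × Int)
    (b : List Int) (hlen : st.2 = (b.length : Int))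
    (hsl : PySem.List.slice l (some st.1) (some (st.1 + st.2)) = b)
    (hruns : ∀ p ∈ runs, PySem.List.slice l (some p.1) (some (p.1 + p.2.length)) = p.2) :
    (runs.foldl pickIdx st).2 = (((runs.foldl pickLen b)).length : Int) ∧
    PySem.List.slice l (some (runs.foldl pickIdx st).1)
      (some ((runs.foldl pickIdx st).1 + (runs.foldl pickIdx st).2)) =
      runs.foldl pickLen b := by
  induction runs generalizing st b with
  | nil => exact ⟨hlen, hsl⟩
  | cons q qs ih =>
    simp only [List.foldl_cons]
    have hq := hruns q (List.mem_cons_self)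
    by_cases hc : (q.2.length : Int) > st.2
    · rw [show pickIdx st q = (q.1, (q.2.length : Int)) from by rw [pickIdx, if_pos hc],
        show pickLen b q = q.2 from by
          rw [pickLen, if_pos (by rw [hlen] at hc; exact_mod_cast hc)]]
      exact ih (q.1, (q.2.length : Int)) q.2 rfl hq
        (fun p hp => hruns p (List.mem_cons_of_mem _ hp))
    · rw [show pickIdx st q = st from by rw [pickIdx, if_neg hc],
        show pickLen b q = b from by
          rw [pickLen, if_neg (by rw [hlen] at hc; omega)]]
      exact ih st b hlen hsl (fun p hp => hruns p (List.mem_cons_of_mem _ hp))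

-- the list fold over indexed runs equals the fold over groupby runs
theorem pickLen_eq_bestFold (l : List Int) (c : Int) (b : List Int) :
    (gruns l c).foldl pickLen b = (runsB l).foldl bestStep b := by
  match l with
  | [] =>
    rw [show gruns ([] : List Int) c = [] from by rw [gruns], runsB]
    rfl
  | x :: xs =>
    by_cases hx : badB x = true
    · have hgx : gd x = false := by simp [gd, hx]
      have hp : (fun y => gd y == gd x) = (fun y => gd y == false) := by rw [hgx]
      rw [gruns, if_pos hx, runsB, hp, List.foldl_cons,
        show bestStep b (gd x, x :: xs.takeWhile (fun y => gd y == false)) = b from by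
          rw [bestStep]; simp [hgx]]
      rw [pickLen_eq_bestFold xs (c + 1) b]
      rw [fold_dropBad]
    · have hgx : gd x = true := by simp [gd, hx]
      have hp : (fun y => gd y == gd x) = (fun y => gd y == true) := by rw [hgx]
      have hlt : (xs.dropWhile (fun y => gd y == true)).length < (x :: xs).length :=
        Nat.lt_succ_of_le (List.length_dropWhile_le _ _)
      rw [gruns, if_neg hx, runsB, hp, List.foldl_cons, List.foldl_cons,
        show bestStep b (gd x, x :: xs.takeWhile (fun y => gd y == true)) =
          pickLen b (c, x :: xs.takeWhile (fun y => gd y == true)) from by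
            rw [bestStep, pickLen]; simp [hgx]]
      exact pickLen_eq_bestFold (xs.dropWhile (fun y => gd y == true)) _ _
termination_by l.length
decreasing_by
  · exact Nat.lt_succ_self _
  · exact hlt

-- runs of gruns in slice form, at offset 0
theorem gruns_slice (l : List Int) (p : Int × List Int) (hp : p ∈ gruns l 0) :
    PySem.List.slice l (some p.1) (some (p.1 + p.2.length)) = p.2 := by
  obtain ⟨j, hj1, hj2⟩ := gruns_segment l 0 p hp
  rw [hj1, zero_add, show (j : Int) + (p.2.length : Int) = ((j + p.2.length : Nat) : Int) from by
    push_cast; ring, PySem.List.slice_natCast]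
  rw [show j + p.2.length - j = p.2.length from by omega]
  exact hj2

-- ===== VERDICT (by name: the statement is the Claim_ definition above) =====
theorem get_longest_prime_digits_spec : Claim_equal_get_longest_prime_digits := by
  intro lst _
  simp only [Spec_get_longest_prime_digits, get_longest_prime_digits,
    get_longest_prime_digits_alt]
  have hb : ([-1] ++ ((PySem.List.enumerate lst 0).filter (fun p => badB p.2)).map (fun p => p.1)
      ++ [(lst.length : Int)]) = boundsC lst 0 := by
    rw [enum_eq_badPosC, boundsC]
    norm_num
  rw [hb, gapFold_eq_pickFold lst 0 ((0:Int), (0:Int)) (by norm_num)]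
  have hsl0 : PySem.List.slice lst (some ((0:Int), (0:Int)).1)
      (some (((0:Int), (0:Int)).1 + ((0:Int), (0:Int)).2)) = [] := by
    simp [PySem.List.slice_to]
  have key := pick_couple lst (gruns lst 0) ((0:Int), (0:Int)) [] (by simp) hsl0
    (fun p hp => gruns_slice lst p hp)
  rw [key.2, pickLen_eq_bestFold lst 0 [], aLoop_eq_fold]
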